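-- pv_equiv track=rewrite | github.com/GregEPersonal/xpong | main.py | get_all_rally
-- ===== SOURCE A (Python) =====
-- def get_all_rally(events):
--     rally_count = 0
--     total_rallies = []
--     for event in events:
--         if event["type"] in ("shot_speed", "serve_speed"):
--             rally_count += 1
--         elif event["type"] == "point_scored":
--             total_rallies.append(rally_count)
--             rally_count = 0
--     return total_rallies
-- ===== SOURCE B (Python) =====
-- def get_all_rally(events):
--     segments = []
--     current = []
--     for event in events:
--         if event["type"] == "point_scored":
--             segments.append(current)
--             current = []
--         else:
--             current.append(event)
--     return [sum(1 for e in seg if e["type"] in ("shot_speed", "serve_speed"))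
--             for seg in segments]
-- ===== Notes on version B (the rewrite author's own statement) =====
-- stated objective: alternative
-- what changed: B first splits the event stream into per-point segments (dropping the trailing unterminated segment) and then counts shot/serve events per segment in a separate pass, instead of A's single running counter.
import Mathlib
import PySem

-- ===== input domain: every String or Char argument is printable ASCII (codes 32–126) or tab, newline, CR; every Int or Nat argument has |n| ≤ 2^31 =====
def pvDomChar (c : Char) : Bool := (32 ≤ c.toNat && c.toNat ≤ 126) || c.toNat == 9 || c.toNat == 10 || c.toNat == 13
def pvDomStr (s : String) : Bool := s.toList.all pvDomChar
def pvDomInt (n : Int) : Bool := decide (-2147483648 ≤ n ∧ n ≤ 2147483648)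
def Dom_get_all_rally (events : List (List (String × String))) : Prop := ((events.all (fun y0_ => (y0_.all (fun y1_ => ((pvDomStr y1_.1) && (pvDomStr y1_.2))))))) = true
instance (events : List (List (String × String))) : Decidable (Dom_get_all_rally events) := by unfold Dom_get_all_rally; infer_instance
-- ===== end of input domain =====

-- B splits events into per-point segments and counts speed events per segment, instead of A's running counter; proved equal under Pre_ (every event has a "type" key).


-- ===== PORT A =====
-- event["type"]: under Pre_ the key is present; getD "" is exact there (Python raises KeyError otherwise, excluded by Pre_)
def pvTypeOf (event : List (String × String)) : String :=
  (PySem.Dict.get? ⟨event⟩ "type").getD ""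

def pvStepA (st : Int × List Int) (event : List (String × String)) : Int × List Int :=
  if pvTypeOf event = "shot_speed" ∨ pvTypeOf event = "serve_speed" then
    (st.1 + 1, st.2)
  else if pvTypeOf event = "point_scored" then
    (0, st.2 ++ [st.1])
  else st

def get_all_rally (events : List (List (String × String))) : List Int :=
  (events.foldl pvStepA (0, [])).2

-- ===== PORT B =====
def pvStepB (st : List (List (String × String)) × List (List (List (String × String))))
    (event : List (String × String)) :
    List (List (String × String)) × List (List (List (String × String))) :=
  if pvTypeOf event = "point_scored" then ([], st.2 ++ [st.1])
  else (st.1 ++ [event], st.2)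

def pvIsSpeed (e : List (String × String)) : Bool :=
  pvTypeOf e == "shot_speed" || pvTypeOf e == "serve_speed"

def pvCount (seg : List (List (String × String))) : Int :=
  (seg.countP pvIsSpeed : Int)

def get_all_rally_alt (events : List (List (String × String))) : List Int :=
  ((events.foldl pvStepB ([], [])).2).map pvCount

-- ===== PRECONDITION & SPEC =====
-- Pre_ excludes exactly the inputs where an event lacks the "type" key, on which Python A raises KeyError.
def Pre_get_all_rally (events : List (List (String × String))) : Prop :=
  (events.all (fun ev => (PySem.Dict.get? (⟨ev⟩ : PySem.Dict String String) "type").isSome)) = true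
instance (events : List (List (String × String))) : Decidable (Pre_get_all_rally events) := by
  unfold Pre_get_all_rally; infer_instance

def pvWitness_get_all_rally : (List (List (String × String))) :=
  [[("type", "serve_speed")], [("type", "shot_speed")], [("type", "point_scored")]]

def Spec_get_all_rally (events : List (List (String × String))) (out : List Int) : Prop := out = get_all_rally_alt events
instance (events : List (List (String × String))) (out : List Int) : Decidable (Spec_get_all_rally events out) := by unfold Spec_get_all_rally; infer_instance

-- ===== CLAIM (what is proved, stated in full; the proofs are below) =====
def Claim_equal_get_all_rally : Prop := ∀ (events : List (List (String × String))), Dom_get_all_rally events → Pre_get_all_rally events → Spec_get_all_rally events (get_all_rally events)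

-- ===== LEMMAS AND PROOFS =====

-- loop invariant: A's state is the image of B's state under (pvCount, map pvCount)
lemma pv_loop_eq (events : List (List (String × String)))
    (cur : List (List (String × String))) (segs : List (List (List (String × String)))) :
    events.foldl pvStepA (pvCount cur, segs.map pvCount)
      = (pvCount (events.foldl pvStepB (cur, segs)).1,
         ((events.foldl pvStepB (cur, segs)).2).map pvCount) := by
  induction events generalizing cur segs with
  | nil => rfl
  | cons e es ih =>
    simp only [List.foldl_cons]
    by_cases hp : pvTypeOf e = "point_scored"
    · have hs : ¬ (pvTypeOf e = "shot_speed" ∨ pvTypeOf e = "serve_speed") := by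
        simp [hp]
      rw [show pvStepA (pvCount cur, segs.map pvCount) e
            = (pvCount [], (segs ++ [cur]).map pvCount) by
          simp [pvStepA, hp, pvCount]]
      rw [show pvStepB (cur, segs) e = ([], segs ++ [cur]) by simp [pvStepB, hp]]
      exact ih [] (segs ++ [cur])
    · have hcnt : pvCount (cur ++ [e])
          = pvCount cur + (if pvIsSpeed e then 1 else 0) := by
        simp [pvCount, List.countP_append, List.countP_cons]
      by_cases hs : pvTypeOf e = "shot_speed" ∨ pvTypeOf e = "serve_speed"
      · have hspeed : pvIsSpeed e = true := by
          simp [pvIsSpeed]; rcases hs with h | h <;> simp [h]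
        rw [show pvStepA (pvCount cur, segs.map pvCount) e
              = (pvCount (cur ++ [e]), segs.map pvCount) by
            simp [pvStepA, hs, hcnt, hspeed]]
        rw [show pvStepB (cur, segs) e = (cur ++ [e], segs) by simp [pvStepB, hp]]
        exact ih (cur ++ [e]) segs
      · have hspeed : pvIsSpeed e = false := by
          simp [pvIsSpeed]
          exact ⟨fun h => hs (Or.inl h), fun h => hs (Or.inr h)⟩
        rw [show pvStepA (pvCount cur, segs.map pvCount) e
              = (pvCount (cur ++ [e]), segs.map pvCount) by
            simp [pvStepA, hs, hp, hcnt, hspeed]]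
        rw [show pvStepB (cur, segs) e = (cur ++ [e], segs) by simp [pvStepB, hp]]
        exact ih (cur ++ [e]) segs

-- ===== VERDICT (by name: the statement is the Claim_ definition above) =====
theorem get_all_rally_spec : Claim_equal_get_all_rally := by
  intro events _ _
  show get_all_rally events = get_all_rally_alt events
  unfold get_all_rally get_all_rally_alt
  have h := pv_loop_eq events [] []
  simp only [pvCount, List.countP_nil, List.map_nil, Nat.cast_zero] at h
  rw [h]
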